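-- pv_equiv track=rewrite | github.com/Aplace0927/gef-pprint-register | src/gef_pprint_register.py | fmt_c
-- ===== SOURCE A (Python) =====
-- def fmt_c(x, n) -> str:
--     string = ""
--     for _ in range(n // 8):
--         ch = x & 0xFF
--         x >>= 8
--         if ch == 0xA:
--             string += chr(0x21B5)
--         elif ch == 0x20:
--             string += chr(0x2423)
--         elif ch == 0x7F:
--             string += chr(0x2421)
--         elif ch & 0x7F < 0x20:
--             if ch > 0x7F:
--                 string += "."
--             else:
--                 string += chr(0x2400 + ch)
--         else:
--             string += chr(ch)
--
--     return string
-- ===== SOURCE B (Python) =====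
-- _TRANS = {
--     i: (0x21B5 if i == 0xA else
--         0x2423 if i == 0x20 else
--         0x2421 if i == 0x7F else
--         0x2E if (i & 0x7F) < 0x20 and i > 0x7F else
--         0x2400 + i if (i & 0x7F) < 0x20 else
--         i)
--     for i in range(256)
-- }
--
--
-- def fmt_c(x, n) -> str:
--     q = n // 8
--     if q <= 0:
--         return ""
--     m = x % (1 << (8 * q))  # the q little-endian bytes of x, two's-complement exact
--     return m.to_bytes(q, "little").decode("latin-1").translate(_TRANS)
-- ===== Notes on version B (the rewrite author's own statement) =====
-- stated objective: faster
-- what changed: Instead of A's per-byte Python loop (shift/mask each byte and grow the string through an if/elif cascade), B reduces x once modulo 2**(8*q) so the bytes become a single nonnegative int, converts them in bulk with int.to_bytes(q,'little'), decodes as latin-1 and applies str.translate with a precomputed 256-entry table - the whole conversion runs in C bulk operations with no per-byte Python iteration.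
import Mathlib
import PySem

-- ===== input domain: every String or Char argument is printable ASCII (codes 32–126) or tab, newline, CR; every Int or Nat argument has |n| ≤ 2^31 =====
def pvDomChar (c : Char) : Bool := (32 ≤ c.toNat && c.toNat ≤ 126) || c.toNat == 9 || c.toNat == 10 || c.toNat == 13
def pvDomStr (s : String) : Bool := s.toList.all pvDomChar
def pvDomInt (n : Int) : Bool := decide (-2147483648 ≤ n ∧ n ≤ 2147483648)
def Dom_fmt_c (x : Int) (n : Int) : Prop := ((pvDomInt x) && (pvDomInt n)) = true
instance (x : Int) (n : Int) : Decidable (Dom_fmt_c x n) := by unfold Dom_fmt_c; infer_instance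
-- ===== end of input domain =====

-- B replaces A's per-byte loop (shift/mask + if/elif cascade, growing a string) by a bulk pipeline:
-- reduce x modulo 2^(8*q), take the q little-endian bytes of the nonnegative result, and translate
-- them through a precomputed 256-entry table (objective: faster, no per-byte Python-level loop).

-- ===== PORT A =====
-- literal transliteration of A: loop n//8 times carrying (string, x); strings as List Char, packed at the end
-- pvStepA is A's loop body, step for step
def pvStepA (st : List Char × Int) (_ : Int) : List Char × Int :=
  let string := st.1
  let ch := PySem.Int.band st.2 0xFF
  let x := st.2 >>> (8 : Nat)
  if ch = 0xA then (string ++ [Char.ofNat 0x21B5], x)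
  else if ch = 0x20 then (string ++ [Char.ofNat 0x2423], x)
  else if ch = 0x7F then (string ++ [Char.ofNat 0x2421], x)
  else if PySem.Int.band ch 0x7F < 0x20 then
    if ch > 0x7F then (string ++ ['.'], x)
    else (string ++ [Char.ofNat (0x2400 + ch).toNat], x)
  else (string ++ [Char.ofNat ch.toNat], x)

def fmt_c (x : Int) (n : Int) : String :=
  let st := (PySem.List.pyRange 0 (PySem.Int.floordiv n 8) 1).foldl pvStepA (([] : List Char), x)
  String.ofList st.1

-- ===== PORT B =====
-- the value expression of Source B's _TRANS dict comprehension, for key i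
def pvTransCode (i : Int) : Int :=
  if i = 0xA then 0x21B5
  else if i = 0x20 then 0x2423
  else if i = 0x7F then 0x2421
  else if PySem.Int.band i 0x7F < 0x20 ∧ i > 0x7F then 0x2E
  else if PySem.Int.band i 0x7F < 0x20 then 0x2400 + i
  else i

-- _TRANS of Source B: the dict {i: pvTransCode i for i in range(256)}
def pvTrans : PySem.Dict Int Int :=
  (PySem.List.pyRange 0 256 1).foldl (fun d i => d.insert i (pvTransCode i)) PySem.Dict.empty

-- Source B: q = n//8; if q <= 0: ""; m = x % (1 << 8q); m.to_bytes(q,'little') (byte i = m // 256^i % 256,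
-- exact since 0 ≤ m < 2^(8q)); .decode('latin-1') makes char of each byte; .translate(_TRANS) maps its
-- code through the dict (codes absent from the dict stay — all of 0..255 are present).
def fmt_c_alt (x : Int) (n : Int) : String :=
  let q := PySem.Int.floordiv n 8
  if q ≤ 0 then "" else
    let m := PySem.Int.mod x ((1 : Int) <<< (8 * q).toNat)
    String.ofList ((List.range q.toNat).map (fun i =>
      let b := PySem.Int.mod (PySem.Int.floordiv m ((256 : Int) ^ i)) 256
      Char.ofNat ((pvTrans.getD b b).toNat)))

-- ===== PRECONDITION & SPEC =====
def Spec_fmt_c (x : Int) (n : Int) (out : String) : Prop := out = fmt_c_alt x n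
instance (x : Int) (n : Int) (out : String) : Decidable (Spec_fmt_c x n out) := by unfold Spec_fmt_c; infer_instance

-- ===== CLAIM (what is proved, stated in full; the proofs are below) =====
def Claim_equal_fmt_c : Prop := ∀ (x : Int) (n : Int), Dom_fmt_c x n → Spec_fmt_c x n (fmt_c x n)

-- ===== LEMMAS AND PROOFS =====

-- Python's  y & 0xFF  is  y mod 256, for every integer y
lemma pv_band255_eq_emod (y : Int) : PySem.Int.band y 0xFF = y % 256 := by
  unfold PySem.Int.band
  split_ifs with h1 h2 h2
  · have h : y.toNat &&& (0xFF : Int).toNat = y.toNat % 256 := by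
      have := Nat.and_two_pow_sub_one_eq_mod y.toNat 8
      simpa using this
    rw [h]
    push_cast
    omega
  · norm_num at h2
  · -- y < 0: band = 255 - ((-y-1).toNat &&& 255) = 255 - (-y-1) % 256
    have h : (0xFF : Int).toNat &&& (-y - 1).toNat = (-y - 1).toNat % 256 := by
      rw [Nat.and_comm]
      have := Nat.and_two_pow_sub_one_eq_mod (-y - 1).toNat 8
      simpa using this
    rw [h]
    have hle : (-y - 1).toNat % 256 < 256 := Nat.mod_lt _ (by norm_num)
    push_cast [Nat.cast_sub (le_of_lt hle)]
    omega
  · norm_num at h2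

-- A's per-step char cascade, factored out
def pvCellA (ch : Int) : Char :=
  if ch = 0xA then Char.ofNat 0x21B5
  else if ch = 0x20 then Char.ofNat 0x2423
  else if ch = 0x7F then Char.ofNat 0x2421
  else if PySem.Int.band ch 0x7F < 0x20 then
    if ch > 0x7F then '.' else Char.ofNat (0x2400 + ch).toNat
  else Char.ofNat ch.toNat

-- for every byte value, A's cascade produces exactly the char of B's table entry
set_option maxRecDepth 100000 in
lemma pv_cell_eq_table : ∀ b : Nat, b < 256 →
    pvCellA (b : Int) = Char.ofNat ((pvTrans.getD (b : Int) (b : Int)).toNat) := by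
  decide

-- shift composition (A consumes x one byte at a time)
lemma pv_shift_shift (x : Int) (k : Nat) : (x >>> (8 : Nat)) >>> (8 * k) = x >>> (8 * (k + 1)) := by
  simp [Int.shiftRight_eq_div_pow, Int.ediv_ediv_of_nonneg, pow_add, pow_mul]
  ring_nf

-- A's one step appends the cascade char of the low byte and advances x by one byte
lemma pv_step (t : List Char) (y : Int) (a : Int) :
    pvStepA (t, y) a = (t ++ [pvCellA (PySem.Int.band y 0xFF)], y >>> (8 : Nat)) := by
  unfold pvStepA pvCellA
  dsimp only
  split_ifs <;> rfl

-- A's loop, characterized: byte k of x, mapped through the cascade, for each index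
lemma pv_loop_spec (l : List Int) (x : Int) (s : List Char) :
    l.foldl pvStepA (s, x)
    = (s ++ (List.range l.length).map
          (fun (k : Nat) => pvCellA (PySem.Int.band (x >>> (8 * k : Nat)) 0xFF)),
       x >>> (8 * l.length : Nat)) := by
  induction l generalizing x s with
  | nil => simp
  | cons a l ih =>
    rw [List.foldl_cons, pv_step, ih]
    refine Prod.ext ?_ ?_
    · simp only [List.length_cons, List.range_succ_eq_map, List.map_cons, List.map_map,
        Nat.mul_zero, Int.shiftRight_zero, List.append_assoc, List.singleton_append]
      congr 1
      congr 1
      apply List.map_congr_left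
      intro k _
      simp only [Function.comp, Nat.succ_eq_add_one]
      rw [pv_shift_shift]
    · simp only [List.length_cons]
      rw [pv_shift_shift]

-- byte k of (x mod 2^(8q)) is byte k of x, for k < q
lemma pv_byte_of_mod (x : Int) (q k : Nat) (hk : k < q) :
    (x % 2 ^ (8 * q)) / 2 ^ (8 * k) % 256 = x / 2 ^ (8 * k) % 256 := by
  have hsplit : x % 2 ^ (8 * q) = x - 2 ^ (8 * q) * (x / 2 ^ (8 * q)) := by
    rw [Int.emod_def]
  have hfac : (2 : Int) ^ (8 * q) = 2 ^ (8 * k) * 2 ^ (8 * (q - k)) := by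
    rw [← pow_add]; congr 1; omega
  set t := x / 2 ^ (8 * q) with ht
  have hdiv : (x % 2 ^ (8 * q)) / 2 ^ (8 * k)
      = x / 2 ^ (8 * k) - 2 ^ (8 * (q - k)) * t := by
    have harr : x - 2 ^ (8 * q) * t = x + (-(2 ^ (8 * (q - k)) * t)) * 2 ^ (8 * k) := by
      rw [hfac]; ring
    rw [hsplit, harr, Int.add_mul_ediv_right _ _ (by positivity : (2:Int) ^ (8*k) ≠ 0)]
    ring
  rw [hdiv]
  have h256 : (256 : Int) ∣ 2 ^ (8 * (q - k)) * t := by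
    refine Dvd.dvd.mul_right ?_ t
    have : (256 : Int) = 2 ^ 8 := by norm_num
    rw [this]
    exact pow_dvd_pow 2 (by omega)
  omega

-- ===== VERDICT (by name: the statement is the Claim_ definition above) =====
theorem fmt_c_spec : Claim_equal_fmt_c := by
  intro x n _
  unfold Spec_fmt_c fmt_c fmt_c_alt
  rw [pv_loop_spec]
  simp only [List.nil_append]
  generalize PySem.Int.floordiv n 8 = q
  by_cases hq0 : q ≤ 0
  · rw [if_pos hq0]
    have hnil : PySem.List.pyRange 0 q 1 = [] := by
      rw [PySem.List.pyRange_one]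
      rw [Int.sub_zero, Int.toNat_of_nonpos hq0]
      rfl
    rw [hnil]
    rfl
  · rw [if_neg hq0]
    replace hq0 : 0 < q := by omega
    have hlen : (PySem.List.pyRange 0 q 1).length = q.toNat := by
      rw [PySem.List.length_pyRange_one, Int.sub_zero]
    rw [hlen]
    refine congrArg String.ofList ?_
    apply List.map_congr_left
    intro k hk
    have hkq : k < q.toNat := List.mem_range.mp hk
    -- B's byte value
    have hpow : ((1 : Int) <<< (8 * q).toNat) = 2 ^ (8 * q.toNat) := by
      rw [show ((8 * q).toNat) = 8 * q.toNat from by omega, Int.shiftLeft_eq, one_mul]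
    have hmod : PySem.Int.mod x ((1 : Int) <<< (8 * q).toNat) = x % 2 ^ (8 * q.toNat) := by
      rw [hpow, PySem.Int.mod_eq_emod_of_pos (by positivity)]
    have hdivB : PySem.Int.floordiv (x % 2 ^ (8 * q.toNat)) ((256 : Int) ^ k)
        = (x % 2 ^ (8 * q.toNat)) / (256 : Int) ^ k := by
      rw [PySem.Int.floordiv_eq_ediv_of_pos (by positivity)]
    have hmodB : ∀ z : Int, PySem.Int.mod z 256 = z % 256 := fun z =>
      PySem.Int.mod_eq_emod_of_pos (by norm_num)
    have h256k : ((256 : Int)) ^ k = 2 ^ (8 * k) := by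
      rw [show (256 : Int) = 2 ^ 8 from by norm_num, ← pow_mul]
    -- the common byte value
    have hbyte : PySem.Int.mod (PySem.Int.floordiv (PySem.Int.mod x ((1 : Int) <<< (8 * q).toNat)) ((256 : Int) ^ k)) 256
        = x / 2 ^ (8 * k) % 256 := by
      rw [hmod, hdivB, hmodB, h256k, pv_byte_of_mod x q.toNat k hkq]
    -- A's byte value
    have hbandA : PySem.Int.band (x >>> (8 * k : Nat)) 0xFF = x / 2 ^ (8 * k) % 256 := by
      rw [pv_band255_eq_emod, Int.shiftRight_eq_div_pow]
      push_cast
      ring_nf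
    have hnn : (0 : Int) ≤ x / 2 ^ (8 * k) % 256 := Int.emod_nonneg _ (by norm_num)
    have hlt : x / 2 ^ (8 * k) % 256 < 256 := Int.emod_lt_of_pos _ (by norm_num)
    set c : Int := x / 2 ^ (8 * k) % 256 with hc
    have hcnat : c = ((c.toNat : Nat) : Int) := by omega
    simp only [hbandA, hbyte]
    rw [hcnat]
    exact pv_cell_eq_table c.toNat (by omega)
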